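-- pv_equiv track=rewrite | github.com/eloyhz/competitive-programming | codeforces/training/cf463_d2_b_caisa_and_pylons.py | solve_editorial
-- ===== SOURCE A (Python) =====
-- def solve_editorial(n, h):
--     energy = 0
--     money = h[0]
--     for k in range(n - 1):
--         energy += h[k] - h[k + 1]
--         if energy < 0:
--             money += abs(energy)
--             energy = 0
--     return money
-- ===== SOURCE B (Python) =====
-- def solve_editorial(n, h):
--     # Closed form: the money spent equals the maximum height among the
--     # first n pylons (with fewer than two pylons the cost is just h[0]).
--     return max(h[:n]) if n > 1 else h[0]
-- ===== Notes on version B (the rewrite author's own statement) =====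
-- stated objective: simpler
-- what changed: Replaces the running energy/money accumulation loop with the closed form max(h[:n]): the scan's money is provably the maximum of the first n heights.
import Mathlib
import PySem

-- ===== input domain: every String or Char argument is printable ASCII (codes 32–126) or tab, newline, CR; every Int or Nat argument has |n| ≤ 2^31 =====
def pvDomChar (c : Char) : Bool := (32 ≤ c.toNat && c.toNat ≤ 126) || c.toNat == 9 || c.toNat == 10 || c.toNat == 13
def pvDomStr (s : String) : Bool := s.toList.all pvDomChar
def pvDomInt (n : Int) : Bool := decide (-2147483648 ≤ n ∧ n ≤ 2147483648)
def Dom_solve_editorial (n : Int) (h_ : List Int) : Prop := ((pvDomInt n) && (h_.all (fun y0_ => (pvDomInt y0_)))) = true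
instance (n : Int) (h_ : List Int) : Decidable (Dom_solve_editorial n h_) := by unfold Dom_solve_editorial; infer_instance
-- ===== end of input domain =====

-- B replaces A's running energy/money loop by the closed form max(h[:n]) (h[0] when n ≤ 1): simpler, same cost.


-- ===== PORT A =====
def solve_editorial (n : Int) (h_ : List Int) : Int :=
  let s := (PySem.List.pyRange 0 (n - 1) 1).foldl
    (fun (st : Int × Int) k =>
      let energy := st.1 + PySem.List.pyGetD h_ k 0 - PySem.List.pyGetD h_ (k + 1) 0
      if energy < 0 then (0, st.2 + |energy|) else (energy, st.2))
    (0, PySem.List.pyGetD h_ 0 0)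
  s.2

-- ===== PORT B =====
def solve_editorial_alt (n : Int) (h_ : List Int) : Int :=
  if 1 < n then
    (PySem.List.max? (PySem.List.slice h_ none (some n)) (fun y => y)).getD 0
  else
    PySem.List.pyGetD h_ 0 0

-- ===== PRECONDITION & SPEC =====
-- Pre_ is exactly the inputs on which A returns: h nonempty (h[0]) and n ≤ len(h) (A reads h[n-1]); outside it A raises IndexError.
def Pre_solve_editorial (n : Int) (h_ : List Int) : Prop := h_ ≠ [] ∧ n ≤ (h_.length : Int)
instance (n : Int) (h_ : List Int) : Decidable (Pre_solve_editorial n h_) := by unfold Pre_solve_editorial; infer_instance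
def pvWitness_solve_editorial : Int × List Int := (3, [2, 5, 3])

def Spec_solve_editorial (n : Int) (h_ : List Int) (out : Int) : Prop := out = solve_editorial_alt n h_
instance (n : Int) (h_ : List Int) (out : Int) : Decidable (Spec_solve_editorial n h_ out) := by unfold Spec_solve_editorial; infer_instance

-- ===== CLAIM (what is proved, stated in full; the proofs are below) =====
def Claim_equal_solve_editorial : Prop := ∀ (n : Int) (h_ : List Int), Dom_solve_editorial n h_ → Pre_solve_editorial n h_ → Spec_solve_editorial n h_ (solve_editorial n h_)

-- ===== LEMMAS AND PROOFS =====

-- running prefix maximum of the first m+1 heights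
def pvMax (h_ : List Int) (m : Nat) : Int := (h_.take (m + 1)).foldl max (h_.getD 0 0)

theorem pvMax_succ (h_ : List Int) (m : Nat) (hm : m + 1 < h_.length) :
    pvMax h_ (m + 1) = max (pvMax h_ m) (h_.getD (m + 1) 0) := by
  have ht : h_.take (m + 1 + 1) = h_.take (m + 1) ++ [h_.getD (m + 1) 0] := by
    rw [List.take_add_one]
    simp [List.getElem?_eq_getElem hm, List.getD]
  unfold pvMax
  rw [ht, List.foldl_append]
  simp

-- loop invariant: after m iterations the state is (money − h[m], money) with money = pvMax h_ m
theorem pv_loop (h_ : List Int) (m : Nat) (hm : m < h_.length) :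
    (PySem.List.pyRange 0 (m : Int) 1).foldl
      (fun (st : Int × Int) k =>
        let energy := st.1 + PySem.List.pyGetD h_ k 0 - PySem.List.pyGetD h_ (k + 1) 0
        if energy < 0 then (0, st.2 + |energy|) else (energy, st.2))
      (0, PySem.List.pyGetD h_ 0 0)
    = (pvMax h_ m - h_.getD m 0, pvMax h_ m) := by
  induction m with
  | zero =>
    have hne : h_ ≠ [] := by intro h; simp [h] at hm
    obtain ⟨a, t, rfl⟩ := List.exists_cons_of_ne_nil hne
    simp [pvMax]
  | succ m ih =>
    have hm' : m < h_.length := by omega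
    have hsplit : PySem.List.pyRange 0 ((m : Int) + 1) 1
        = PySem.List.pyRange 0 (m : Int) 1 ++ [(m : Int)] :=
      PySem.List.pyRange_one_succ_right (by positivity)
    push_cast
    rw [hsplit, List.foldl_append, ih hm']
    have h1 : PySem.List.pyGetD h_ (m : Int) 0 = h_.getD m 0 := by simp
    have h2 : PySem.List.pyGetD h_ ((m : Int) + 1) 0 = h_.getD (m + 1) 0 := by
      rw [show ((m : Int) + 1) = ((m + 1 : Nat) : Int) by push_cast; ring]
      simp only [PySem.List.pyGetD_natCast]
    have hmax := pvMax_succ h_ m hm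
    simp only [List.foldl_cons, List.foldl_nil, h1, h2]
    by_cases hlt : pvMax h_ m - h_.getD m 0 + h_.getD m 0 - h_.getD (m + 1) 0 < 0
    · have : pvMax h_ m < h_.getD (m + 1) 0 := by omega
      simp only [if_pos hlt]
      rw [hmax, max_eq_right (le_of_lt this), abs_of_neg hlt]
      simp only [Prod.mk.injEq]
      omega
    · simp only [if_neg hlt]
      have : h_.getD (m + 1) 0 ≤ pvMax h_ m := by omega
      rw [hmax, max_eq_left this]
      exact Prod.ext (by ring) rfl

theorem solve_editorial_spec : Claim_equal_solve_editorial := by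
  intro n h_ _ hpre
  obtain ⟨hne, hlen⟩ := hpre
  unfold Spec_solve_editorial solve_editorial solve_editorial_alt
  obtain ⟨a, t, rfl⟩ := List.exists_cons_of_ne_nil hne
  by_cases hn : 1 < n
  · -- n ≥ 2: the loop runs; result is the prefix max
    set m : Nat := (n - 1).toNat with hmdef
    have hcast : (n - 1 : Int) = (m : Nat) := by omega
    have hmlt : m < (a :: t).length := by simp at hlen ⊢; omega
    rw [hcast, pv_loop _ m hmlt]
    dsimp only
    rw [if_pos hn]
    -- B side: slice is take, destructure to use max?_id_cons
    rw [PySem.List.slice_to _ (by omega : (0:Int) ≤ n)]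
    have htake : (a :: t).take n.toNat = a :: t.take (n.toNat - 1) := by
      have : n.toNat = (n.toNat - 1) + 1 := by omega
      rw [this]; simp
    rw [htake, PySem.List.max?_id_cons]
    -- A side value: pvMax (a :: t) m
    unfold pvMax
    have hm1 : m + 1 = n.toNat := by omega
    rw [hm1]
    rw [htake]
    simp
  · -- n ≤ 1: empty loop, both return h[0]
    have : PySem.List.pyRange 0 (n - 1) 1 = [] := PySem.List.pyRange_one_eq_nil (by omega)
    rw [this, if_neg hn]
    simp
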